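-- pv_equiv track=rewrite | github.com/welsol21/FYP_LLM | ela_pipeline/dataset/build_dataset.py | _count_level_tam
-- ===== SOURCE A (Python) =====
-- from collections import defaultdict
-- from typing import Any, Dict, Iterable, List, Tuple
--
-- def _count_level_tam(rows: List[Dict[str, str]]) -> Dict[str, Dict[str, int]]:
--     matrix: Dict[str, Dict[str, int]] = defaultdict(lambda: defaultdict(int))
--     for row in rows:
--         level = row.get("level", "Unknown")
--         tam = row.get("tam_bucket", "none")
--         matrix[level][tam] += 1
--     return {
--         level: dict(sorted(tam_counts.items(), key=lambda item: item[0]))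
--         for level, tam_counts in sorted(matrix.items(), key=lambda item: item[0])
--     }
-- ===== SOURCE B (Python) =====
-- def _count_level_tam(rows):
--     # Sort the (level, tam) pairs, then run-length encode the sorted list:
--     # each maximal run is one (level, tam) count, already in ascending order.
--     pairs = sorted((r.get("level", "Unknown"), r.get("tam_bucket", "none")) for r in rows)
--     runs = []
--     for p in pairs:
--         if runs and runs[-1][0] == p:
--             runs[-1] = (p, runs[-1][1] + 1)
--         else:
--             runs.append((p, 1))
--     result = {}
--     for (level, tam), cnt in runs:
--         result.setdefault(level, {})[tam] = cnt
--     return result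
-- ===== Notes on version B (the rewrite author's own statement) =====
-- stated objective: alternative
-- what changed: Replaces A's hash-counting into a defaultdict-of-defaultdicts followed by a double sort of the dict items by sort-then-scan: sort the (level, tam) pairs lexicographically, run-length encode the sorted list in one linear scan, and insert the runs (already in ascending order) into the nested result dict.
import Mathlib
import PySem

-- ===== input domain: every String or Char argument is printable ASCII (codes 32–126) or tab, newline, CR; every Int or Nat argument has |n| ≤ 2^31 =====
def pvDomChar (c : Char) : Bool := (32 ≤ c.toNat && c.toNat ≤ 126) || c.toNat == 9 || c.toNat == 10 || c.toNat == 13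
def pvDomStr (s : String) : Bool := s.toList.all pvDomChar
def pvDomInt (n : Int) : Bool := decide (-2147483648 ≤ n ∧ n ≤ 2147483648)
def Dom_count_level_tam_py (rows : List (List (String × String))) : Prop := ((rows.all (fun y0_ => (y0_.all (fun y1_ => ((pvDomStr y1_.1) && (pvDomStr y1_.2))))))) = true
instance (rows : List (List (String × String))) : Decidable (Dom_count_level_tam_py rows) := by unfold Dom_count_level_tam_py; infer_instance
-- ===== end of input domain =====

-- B replaces A's defaultdict-of-defaultdict hash counting + final double sort by sort-then-scan:
-- sort the (level, tam) pairs, run-length encode the sorted list, insert the runs in order (alternative algorithm, not faster).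

-- row.get(k, dflt): first-match lookup in the association list (used by both ports)
def rowGet (row : List (String × String)) (k dflt : String) : String :=
  match row.find? (fun p => p.1 == k) with
  | some p => p.2
  | none => dflt

-- ===== PORT A =====
def count_level_tam_py (rows : List (List (String × String))) : List (String × List (String × Int)) :=
  let matrix : PySem.Dict String (PySem.Dict String Int) :=
    rows.foldl (fun m row =>
      let level := rowGet row "level" "Unknown"
      let tam := rowGet row "tam_bucket" "none"
      -- matrix[level][tam] += 1 on a defaultdict(lambda: defaultdict(int))
      let inner := m.getD level PySem.Dict.empty
      m.insert level (inner.insert tam (inner.getD tam 0 + 1))) PySem.Dict.empty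
  (PySem.List.sorted matrix.items (fun p => p.1)).map
    (fun p => (p.1, (PySem.Dict.ofList (PySem.List.sorted p.2.items (fun q => q.1))).items))

-- ===== PORT B =====
-- one step of the run-length scan: 'if runs and runs[-1][0] == p: bump the last run, else append (p, 1)'
def runStep (acc : List ((String × String) × Int)) (p : String × String) : List ((String × String) × Int) :=
  match acc.getLast? with
  | some qc => if qc.1 == p then acc.dropLast ++ [(p, qc.2 + 1)] else acc ++ [(p, 1)]
  | none => acc ++ [(p, 1)]

def count_level_tam_py_alt (rows : List (List (String × String))) : List (String × List (String × Int)) :=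
  let pairs := PySem.List.sorted2
    (rows.map (fun r => (rowGet r "level" "Unknown", rowGet r "tam_bucket" "none")))
    Prod.fst Prod.snd
  let runs := pairs.foldl runStep []
  -- result.setdefault(level, {})[tam] = cnt
  let result : PySem.Dict String (PySem.Dict String Int) :=
    runs.foldl (fun d pc =>
      d.insert pc.1.1 ((d.getD pc.1.1 PySem.Dict.empty).insert pc.1.2 pc.2)) PySem.Dict.empty
  result.items.map (fun q => (q.1, q.2.items))

-- ===== PRECONDITION & SPEC =====
def Spec_count_level_tam_py (rows : List (List (String × String))) (out : List (String × List (String × Int))) : Prop := out = count_level_tam_py_alt rows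
instance (rows : List (List (String × String))) (out : List (String × List (String × Int))) : Decidable (Spec_count_level_tam_py rows out) := by unfold Spec_count_level_tam_py; infer_instance

-- ===== CLAIM (what is proved, stated in full; the proofs are below) =====
def Claim_equal_count_level_tam_py : Prop := ∀ (rows : List (List (String × String))), Dom_count_level_tam_py rows → Spec_count_level_tam_py rows (count_level_tam_py rows)

-- ===== LEMMAS AND PROOFS =====

-- the tam_bucket values of the rows whose level is L
def tams (L : String) (ps : List (String × String)) : List String :=
  (ps.filter (fun p => p.1 == L)).map Prod.snd

-- ascending list of the distinct elements of xs
def sKeys (xs : List String) : List String :=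
  PySem.List.sorted (PySem.Set.ofList xs) (fun x => x)

-- the common canonical form both ports are reduced to
def C (ps : List (String × String)) : List (String × List (String × Int)) :=
  (sKeys (ps.map Prod.fst)).map
    (fun L => (L, (sKeys (tams L ps)).map (fun t => (t, (ps.count (L, t) : Int)))))

-- ---------- A-side: the matrix fold in closed form ----------

-- closed form of A's matrix items: distinct levels in first-occurrence order, each with a Counter of its tams
def G (ps : List (String × String)) : List (String × PySem.Dict String Int) :=
  (PySem.Set.ofList (ps.map Prod.fst)).map (fun L => (L, PySem.Dict.counter (tams L ps)))

theorem tams_append_singleton (L : String) (ps : List (String × String)) (x : String × String) :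
    tams L (ps ++ [x]) = tams L ps ++ (if x.1 == L then [x.2] else []) := by
  unfold tams
  rw [List.filter_append]
  cases hx : (x.1 == L) <;> simp [List.filter, hx]

theorem tams_eq_nil_of_not_mem (L : String) (ps : List (String × String))
    (h : L ∉ ps.map Prod.fst) : tams L ps = [] := by
  simp only [tams, List.map_eq_nil_iff, List.filter_eq_nil_iff]
  intro p hp hL
  exact h (List.mem_map.mpr ⟨p, hp, by simpa using hL⟩)

theorem mem_tams (L t : String) (ps : List (String × String)) :
    t ∈ tams L ps ↔ (L, t) ∈ ps := by
  simp only [tams, List.mem_map, List.mem_filter]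
  constructor
  · rintro ⟨⟨a, b⟩, ⟨hp, hL⟩, rfl⟩
    simpa using (by simpa using hL : a = L) ▸ hp
  · intro h
    exact ⟨(L, t), ⟨h, by simp⟩, rfl⟩

theorem keys_G (ps : List (String × String)) :
    (G ps).map Prod.fst = PySem.Set.ofList (ps.map Prod.fst) := by
  simp [G, List.map_map, Function.comp_def]

-- A's loop body, on an already-extracted (level, tam) pair
def mstep (m : PySem.Dict String (PySem.Dict String Int)) (p : String × String) :
    PySem.Dict String (PySem.Dict String Int) :=
  let inner := m.getD p.1 PySem.Dict.empty
  m.insert p.1 (inner.insert p.2 (inner.getD p.2 0 + 1))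

theorem matrix_items (ps : List (String × String)) :
    (ps.foldl mstep PySem.Dict.empty).items = G ps := by
  induction ps using List.reverseRecOn with
  | nil => simp [G, PySem.Set.ofList_nil, PySem.Dict.empty]
  | append_singleton ps x ih =>
    rw [List.foldl_append, List.foldl_cons, List.foldl_nil]
    set m := ps.foldl mstep PySem.Dict.empty with hm
    have hkeys : m.keys = PySem.Set.ofList (ps.map Prod.fst) := by
      show m.items.map Prod.fst = _
      rw [ih, keys_G]
    have hnd : m.keys.Nodup := by rw [hkeys]; exact PySem.Set.nodup_ofList _
    obtain ⟨L, t⟩ := x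
    by_cases hL : L ∈ ps.map Prod.fst
    · -- existing level: overwrite in place
      have hLS : L ∈ PySem.Set.ofList (ps.map Prod.fst) := (PySem.Set.mem_ofList _ _).mpr hL
      have hcont : m.contains L = true := by
        rw [PySem.Dict.contains_eq_decide_mem_keys, hkeys]; simpa using hLS
      have hmemitem : (L, PySem.Dict.counter (tams L ps)) ∈ m.items := by
        rw [ih]; exact List.mem_map.mpr ⟨L, hLS, rfl⟩
      have hgetD : m.getD L PySem.Dict.empty = PySem.Dict.counter (tams L ps) :=
        PySem.Dict.getD_of_mem_items m hmemitem hnd _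
      have hinner : (PySem.Dict.counter (tams L ps)).insert t
            ((PySem.Dict.counter (tams L ps)).getD t 0 + 1)
          = PySem.Dict.counter (tams L ps ++ [t]) := by
        rw [PySem.Dict.counter_append_singleton]; rfl
      show (m.insert L _).items = _
      rw [hgetD, hinner, PySem.Dict.items_insert_of_contains m _ hcont, ih]
      unfold G
      rw [List.map_map]
      have hS : PySem.Set.ofList ((ps ++ [(L, t)]).map Prod.fst)
          = PySem.Set.ofList (ps.map Prod.fst) := by
        simp only [List.map_append, List.map_cons, List.map_nil]
        rw [PySem.Set.ofList_append_singleton]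
        exact PySem.Set.add_of_mem hLS
      rw [hS]
      apply List.map_congr_left
      intro L' hL'
      by_cases hEq : L' = L
      · subst hEq
        simp [tams_append_singleton]
      · have hb : (L' == L) = false := by simpa using hEq
        simp [Function.comp_apply, tams_append_singleton,
          show (L == L') = false by simpa using fun h => hEq h.symm]
        exact fun h => absurd h hEq
    · -- new level: appended at the end
      have hLS : L ∉ PySem.Set.ofList (ps.map Prod.fst) := fun h =>
        hL ((PySem.Set.mem_ofList _ _).mp h)
      have hcont : m.contains L = false := by
        rw [PySem.Dict.contains_eq_decide_mem_keys, hkeys]; simpa using hLS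
      have hgetD : m.getD L PySem.Dict.empty = PySem.Dict.empty :=
        PySem.Dict.getD_of_not_contains m _ hcont
      have htams : tams L (ps ++ [(L, t)]) = [t] := by
        rw [tams_append_singleton, tams_eq_nil_of_not_mem L ps hL]; simp
      have hinner : (PySem.Dict.empty (κ := String) (ν := Int)).insert t
            ((PySem.Dict.empty (κ := String) (ν := Int)).getD t 0 + 1)
          = PySem.Dict.counter (tams L (ps ++ [(L, t)])) := by
        rw [htams, show ([t] : List String) = [] ++ [t] from rfl,
          PySem.Dict.counter_append_singleton]
        rfl
      show (m.insert L _).items = _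
      rw [hgetD, hinner, PySem.Dict.items_insert_of_not_contains m _ hcont, ih]
      unfold G
      have hS : PySem.Set.ofList ((ps ++ [(L, t)]).map Prod.fst)
          = PySem.Set.ofList (ps.map Prod.fst) ++ [L] := by
        simp only [List.map_append, List.map_cons, List.map_nil]
        rw [PySem.Set.ofList_append_singleton]
        exact PySem.Set.add_of_not_mem hLS
      rw [hS, List.map_append]
      congr 1
      apply List.map_congr_left
      intro L' hL'
      have hne : L' ≠ L := fun h => hLS (h ▸ hL')
      rw [tams_append_singleton]
      simp [show (L == L') = false by simpa using fun h => hne h.symm]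

theorem items_ofList_nodup {ν : Type} (l : List (String × ν))
    (h : (l.map Prod.fst).Nodup) : (PySem.Dict.ofList l).items = l := by
  show (List.foldl (fun d p => d.insert p.1 p.2) PySem.Dict.empty l).items = l
  have := PySem.Dict.items_foldl_insert_fresh l Prod.fst Prod.snd PySem.Dict.empty
    (fun a _ => PySem.Dict.contains_empty _) h
  simpa using this

theorem count_tams (L t : String) (ps : List (String × String)) :
    (tams L ps).count t = ps.count (L, t) := by
  induction ps with
  | nil => simp [tams]
  | cons p ps ih =>
    obtain ⟨a, b⟩ := p
    by_cases ha : a = L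
    · subst ha
      by_cases hb : b = t
      · subst hb; simp [tams] at ih ⊢; omega
      · simp [tams, hb, Prod.ext_iff] at ih ⊢; omega
    · simp [tams, ha, Prod.ext_iff,
        show (a == L) = false by simpa using ha] at ih ⊢; omega

-- sorting a list of pairs with distinct keys by key = mapping over the sorted distinct keys
theorem sorted_map_keyed {ν : Type} (ks : List String) (f : String → ν) :
    PySem.List.sorted ((PySem.Set.ofList ks).map (fun k => (k, f k))) (fun p => p.1)
      = (PySem.List.sorted (PySem.Set.ofList ks) (fun x => x)).map (fun k => (k, f k)) := by
  apply PySem.List.sorted_eq_of_perm_of_pairwise_lt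
  · exact (PySem.List.sorted_perm _ _ _).map _
  · exact (PySem.List.sorted_ofList_pairwise_lt ks).map _ (fun a b h => h)

theorem A_eq_C (rows : List (List (String × String))) :
    count_level_tam_py rows = C (rows.map (fun r => (rowGet r "level" "Unknown", rowGet r "tam_bucket" "none"))) := by
  unfold count_level_tam_py
  set key := fun r : List (String × String) =>
    (rowGet r "level" "Unknown", rowGet r "tam_bucket" "none") with hkey
  set ps := rows.map key with hps
  have hfold : List.foldl
      (fun (m : PySem.Dict String (PySem.Dict String Int)) row =>
        m.insert (rowGet row "level" "Unknown")
          ((m.getD (rowGet row "level" "Unknown") PySem.Dict.empty).insert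
            (rowGet row "tam_bucket" "none")
            ((m.getD (rowGet row "level" "Unknown") PySem.Dict.empty).getD
              (rowGet row "tam_bucket" "none") 0 + 1)))
      PySem.Dict.empty rows = ps.foldl mstep PySem.Dict.empty := by
    rw [hps, List.foldl_map]
    rfl
  rw [hfold]
  simp only [matrix_items ps]
  unfold G C sKeys
  rw [sorted_map_keyed (ps.map Prod.fst) (fun L => PySem.Dict.counter (tams L ps)),
    List.map_map]
  apply List.map_congr_left
  intro L _
  simp only [Function.comp_def]
  congr 1
  rw [PySem.Dict.items_counter,
    sorted_map_keyed (tams L ps) (fun t => ((tams L ps).count t : Int))]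
  rw [items_ofList_nodup]
  · apply List.map_congr_left
    intro t _
    rw [count_tams]
  · simp only [List.map_map, Function.comp_def]
    have : ((PySem.List.sorted (PySem.Set.ofList (tams L ps)) (fun x => x)).map
        (fun t => ((t, ((tams L ps).count t : Int)) : String × Int).1)) =
        PySem.List.sorted (PySem.Set.ofList (tams L ps)) (fun x => x) := by simp
    simp only [this]
    exact ((PySem.List.sorted_perm _ _ _).nodup_iff).mpr (PySem.Set.nodup_ofList _)

-- ---------- B-side: lexicographic order on the pairs ----------

def lexle (a b : String × String) : Prop := a.1 < b.1 ∨ (a.1 = b.1 ∧ a.2 ≤ b.2)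
def lexlt (a b : String × String) : Prop := a.1 < b.1 ∨ (a.1 = b.1 ∧ a.2 < b.2)

-- the comparison sorted2 uses for keys (Prod.fst, Prod.snd)
def before2 (a b : String × String) : Bool :=
  decide (a.1 < b.1) || (!decide (b.1 < a.1) && decide (a.2 < b.2))

theorem lexle_refl (a : String × String) : lexle a a := Or.inr ⟨rfl, le_refl _⟩

theorem lexlt_le (a b : String × String) (h : lexlt a b) : lexle a b := by
  rcases h with h | ⟨h1, h2⟩
  · exact Or.inl h
  · exact Or.inr ⟨h1, le_of_lt h2⟩

theorem lexlt_ne (a b : String × String) (h : lexlt a b) : a ≠ b := by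
  rintro rfl
  rcases h with h | ⟨_, h⟩ <;> exact absurd h (lt_irrefl _)

theorem lexle_trans {a b c : String × String} (h1 : lexle a b) (h2 : lexle b c) : lexle a c := by
  rcases h1 with h1 | ⟨e1, l1⟩ <;> rcases h2 with h2 | ⟨e2, l2⟩
  · exact Or.inl (lt_trans h1 h2)
  · exact Or.inl (e2 ▸ h1)
  · exact Or.inl (e1 ▸ h2)
  · exact Or.inr ⟨e1.trans e2, le_trans l1 l2⟩

theorem lexle_antisymm {a b : String × String} (h1 : lexle a b) (h2 : lexle b a) : a = b := by
  rcases h1 with h1 | ⟨e1, l1⟩ <;> rcases h2 with h2 | ⟨e2, l2⟩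
  · exact absurd (lt_trans h1 h2) (lt_irrefl _)
  · exact absurd (e2 ▸ h1) (lt_irrefl _)
  · exact absurd (e1 ▸ h2) (lt_irrefl _)
  · exact Prod.ext_iff.mpr ⟨e1, le_antisymm l1 l2⟩

theorem before2_true {a b : String × String} (h : before2 a b = true) : lexle a b := by
  unfold before2 at h
  simp only [Bool.or_eq_true, Bool.and_eq_true, Bool.not_eq_eq_eq_not, Bool.not_true,
    decide_eq_true_eq, decide_eq_false_iff_not] at h
  rcases h with h | ⟨h1, h2⟩
  · exact Or.inl h
  · rcases (not_lt.mp h1).lt_or_eq with h | h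
    · exact Or.inl h
    · exact Or.inr ⟨h, le_of_lt h2⟩

theorem before2_false {a b : String × String} (h : before2 a b = false) : lexle b a := by
  unfold before2 at h
  simp only [Bool.or_eq_false_iff, Bool.and_eq_false_iff, Bool.not_eq_eq_eq_not, Bool.not_false,
    decide_eq_false_iff_not, decide_eq_true_eq] at h
  rcases h with ⟨h1, h2⟩
  rcases (not_lt.mp h1).lt_or_eq with hlt | heq
  · exact Or.inl hlt
  · rcases h2 with h2 | h2
    · exact absurd (heq ▸ h2) (lt_irrefl _)
    · exact Or.inr ⟨heq, not_lt.mp h2⟩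

theorem insertBy_before2_pairwise (x : String × String) (ys : List (String × String))
    (h : List.Pairwise lexle ys) :
    List.Pairwise lexle (PySem.List.insertBy before2 x ys) := by
  induction ys with
  | nil => simp [show PySem.List.insertBy before2 x [] = [x] from rfl]
  | cons y ys ih =>
    rw [show PySem.List.insertBy before2 x (y :: ys)
        = if before2 x y = true then x :: y :: ys else y :: PySem.List.insertBy before2 x ys from rfl]
    rcases List.pairwise_cons.mp h with ⟨hy, hys⟩
    cases hb : before2 x y with
    | true =>
      rw [if_pos rfl]
      refine List.pairwise_cons.mpr ⟨?_, h⟩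
      intro z hz
      rcases List.mem_cons.mp hz with rfl | hz
      · exact before2_true hb
      · exact lexle_trans (before2_true hb) (hy z hz)
    | false =>
      rw [if_neg (by simp)]
      refine List.pairwise_cons.mpr ⟨?_, ih hys⟩
      intro z hz
      rcases (PySem.List.mem_insertBy _ _ _ _).mp hz with rfl | hz
      · exact before2_false hb
      · exact hy z hz

theorem foldl_insertBy_pairwise (ps acc : List (String × String))
    (h : List.Pairwise lexle acc) :
    List.Pairwise lexle (List.foldl (fun acc x => PySem.List.insertBy before2 x acc) acc ps) := by
  induction ps generalizing acc with
  | nil => exact h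
  | cons p ps ih => exact ih _ (insertBy_before2_pairwise p acc h)

theorem sorted2_pairwise (ps : List (String × String)) :
    List.Pairwise lexle (PySem.List.sorted2 ps Prod.fst Prod.snd) := by
  rw [show PySem.List.sorted2 ps Prod.fst Prod.snd
      = List.foldl (fun acc x => PySem.List.insertBy before2 x acc) [] ps from rfl]
  exact foldl_insertBy_pairwise ps [] (by simp)

-- ---------- the canonical sorted pair list and its run-length structure ----------

-- the runs of the sorted pair list: each distinct pair with its multiplicity, in ascending order
def segs (ps : List (String × String)) : List ((String × String) × Nat) :=
  (sKeys (ps.map Prod.fst)).flatMap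
    (fun L => (sKeys (tams L ps)).map (fun t => ((L, t), ps.count (L, t))))

def canonList (ps : List (String × String)) : List (String × String) :=
  (segs ps).flatMap (fun s => List.replicate s.2 s.1)

theorem mem_sKeys (xs : List String) (x : String) : x ∈ sKeys xs ↔ x ∈ xs := by
  unfold sKeys
  rw [(PySem.List.sorted_perm _ _ _).mem_iff, PySem.Set.mem_ofList]

theorem nodup_sKeys (xs : List String) : (sKeys xs).Nodup :=
  ((PySem.List.sorted_perm _ _ _).nodup_iff).mpr (PySem.Set.nodup_ofList _)

theorem pairwise_lt_sKeys (xs : List String) :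
    List.Pairwise (· < ·) (sKeys xs) := PySem.List.sorted_ofList_pairwise_lt xs

theorem segs_pos (ps : List (String × String)) :
    ∀ s ∈ segs ps, 1 ≤ s.2 := by
  intro s hs
  rcases List.mem_flatMap.mp hs with ⟨L, hL, hs⟩
  rcases List.mem_map.mp hs with ⟨t, ht, rfl⟩
  exact List.count_pos_iff.mpr ((mem_tams L t ps).mp ((mem_sKeys _ _).mp ht))

theorem segs_keys_pairwise (ps : List (String × String)) :
    List.Pairwise (fun s t : (String × String) × Nat => lexlt s.1 t.1) (segs ps) := by
  unfold segs
  rw [List.pairwise_flatMap]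
  constructor
  · intro L _
    exact (pairwise_lt_sKeys (tams L ps)).map _ (fun a b h => Or.inr ⟨rfl, h⟩)
  · refine (pairwise_lt_sKeys (ps.map Prod.fst)).imp ?_
    intro L L' hLL' p hp q hq
    rcases List.mem_map.mp hp with ⟨t, _, rfl⟩
    rcases List.mem_map.mp hq with ⟨t', _, rfl⟩
    exact Or.inl hLL'

theorem canon_pairwise (ps : List (String × String)) :
    List.Pairwise lexle (canonList ps) := by
  unfold canonList
  rw [List.pairwise_flatMap]
  constructor
  · intro s _
    exact List.pairwise_replicate.mpr (Or.inr (lexle_refl s.1))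
  · refine (segs_keys_pairwise ps).imp ?_
    intro s t hst p hp q hq
    rw [List.eq_of_mem_replicate hp, List.eq_of_mem_replicate hq]
    exact lexlt_le _ _ hst

theorem count_inner (ps : List (String × String)) (L : String) (ts : List String)
    (hnd : ts.Nodup) (x y : String) :
    ((ts.map (fun t => ((L, t), ps.count (L, t)))).flatMap
        (fun s => List.replicate s.2 s.1)).count (x, y)
      = if L = x ∧ y ∈ ts then ps.count (x, y) else 0 := by
  induction ts with
  | nil => simp
  | cons t ts ih =>
    simp only [List.map_cons, List.flatMap_cons, List.count_append]
    rw [ih hnd.of_cons, List.count_replicate]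
    by_cases hL : L = x
    · subst hL
      by_cases hy : y = t
      · subst hy
        have hyts : y ∉ ts := (List.nodup_cons.mp hnd).1
        simp [hyts]
      · have hty : t ≠ y := fun h => hy h.symm
        by_cases hyts : y ∈ ts <;> simp [hy, hyts, hty]
    · simp [hL]

theorem count_outer (ps : List (String × String)) (Ls : List String)
    (hnd : Ls.Nodup) (x y : String) :
    ((Ls.flatMap (fun L => (sKeys (tams L ps)).map (fun t => ((L, t), ps.count (L, t))))).flatMap
        (fun s => List.replicate s.2 s.1)).count (x, y)
      = if x ∈ Ls ∧ y ∈ sKeys (tams x ps) then ps.count (x, y) else 0 := by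
  induction Ls with
  | nil => simp
  | cons L Ls ih =>
    rw [List.flatMap_cons, List.flatMap_append, List.count_append,
      count_inner ps L _ (nodup_sKeys _) x y, ih hnd.of_cons]
    by_cases hL : L = x
    · subst hL
      have hLLs : L ∉ Ls := (List.nodup_cons.mp hnd).1
      by_cases hy : y ∈ sKeys (tams L ps) <;> simp [hy, hLLs]
    · have hxL : x ≠ L := fun h => hL h.symm
      have hmem : x ∈ L :: Ls ↔ x ∈ Ls := by simp [List.mem_cons, hxL]
      by_cases hx : x ∈ Ls <;> simp [hL, hx, hmem]

theorem canon_perm (ps : List (String × String)) : (canonList ps).Perm ps := by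
  rw [List.perm_iff_count]
  rintro ⟨x, y⟩
  unfold canonList segs
  rw [count_outer ps _ (nodup_sKeys _) x y]
  by_cases h : x ∈ sKeys (ps.map Prod.fst) ∧ y ∈ sKeys (tams x ps)
  · rw [if_pos h]
  · rw [if_neg h]
    symm
    rw [List.count_eq_zero]
    intro hmem
    exact h ⟨(mem_sKeys _ _).mpr (List.mem_map.mpr ⟨(x, y), hmem, rfl⟩),
      (mem_sKeys _ _).mpr ((mem_tams x y ps).mpr hmem)⟩

theorem sorted2_eq_canon (ps : List (String × String)) :
    PySem.List.sorted2 ps Prod.fst Prod.snd = canonList ps := by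
  exact ((PySem.List.sorted2_perm ps Prod.fst Prod.snd false).trans
      (canon_perm ps).symm).eq_of_pairwise
    (fun a b _ _ h1 h2 => lexle_antisymm h1 h2)
    (sorted2_pairwise ps) (canon_pairwise ps)

-- ---------- run-length encoding of the canonical list ----------

theorem foldl_runStep_run (n : Nat) (acc : List ((String × String) × Int))
    (a : String × String) (c : Int) :
    List.foldl runStep (acc ++ [(a, c)]) (List.replicate n a) = acc ++ [(a, c + n)] := by
  induction n generalizing c with
  | zero => simp
  | succ n ih =>
    rw [List.replicate_succ, List.foldl_cons]
    have hstep : runStep (acc ++ [(a, c)]) a = acc ++ [(a, c + 1)] := by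
      unfold runStep
      rw [List.getLast?_concat]
      simp
    rw [hstep, ih]
    have hc : c + 1 + (n : Int) = c + ((n + 1 : Nat) : Int) := by push_cast; ring
    rw [hc]

theorem foldl_runStep_replicate (n : Nat) (hn : 1 ≤ n) (a : String × String)
    (acc : List ((String × String) × Int))
    (hacc : ∀ qc, acc.getLast? = some qc → qc.1 ≠ a) :
    List.foldl runStep acc (List.replicate n a) = acc ++ [(a, (n : Int))] := by
  obtain ⟨m, rfl⟩ : ∃ m, n = m + 1 := ⟨n - 1, by omega⟩
  rw [List.replicate_succ, List.foldl_cons]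
  have hstep : runStep acc a = acc ++ [(a, 1)] := by
    unfold runStep
    cases h : acc.getLast? with
    | none => rfl
    | some qc =>
      have := hacc qc h
      simp [show (qc.1 == a) = false by simpa using this]
  rw [hstep, foldl_runStep_run]
  have hc : (1 : Int) + (m : Int) = ((m + 1 : Nat) : Int) := by push_cast; ring
  rw [hc]

theorem runs_segs (ss : List ((String × String) × Nat)) (acc : List ((String × String) × Int))
    (h1 : ∀ s ∈ ss, 1 ≤ s.2)
    (h2 : List.Pairwise (fun s t : (String × String) × Nat => s.1 ≠ t.1) ss)
    (hacc : ∀ qc, acc.getLast? = some qc → ∀ s ∈ ss, qc.1 ≠ s.1) :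
    List.foldl runStep acc (ss.flatMap (fun s => List.replicate s.2 s.1))
      = acc ++ ss.map (fun s => (s.1, (s.2 : Int))) := by
  induction ss generalizing acc with
  | nil => simp
  | cons s ss ih =>
    rw [List.flatMap_cons, List.foldl_append,
      foldl_runStep_replicate s.2 (h1 s List.mem_cons_self) s.1 acc
        (fun qc h => hacc qc h s List.mem_cons_self),
      ih (acc ++ [(s.1, (s.2 : Int))]) (fun t ht => h1 t (List.mem_cons_of_mem _ ht)) h2.of_cons
        (by
          intro qc hqc t ht
          rw [List.getLast?_concat] at hqc
          cases hqc
          exact (List.pairwise_cons.mp h2).1 t ht)]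
    simp

-- ---------- the setdefault fold over the runs ----------

def dstep (d : PySem.Dict String (PySem.Dict String Int)) (pc : (String × String) × Int) :
    PySem.Dict String (PySem.Dict String Int) :=
  d.insert pc.1.1 ((d.getD pc.1.1 PySem.Dict.empty).insert pc.1.2 pc.2)

theorem items_map_keep_of_not_contains {ν : Type} (d : PySem.Dict String ν) (L : String) (v : ν)
    (h : d.contains L = false) :
    d.items.map (fun p => if (p.1 == L) = true then (L, v) else p) = d.items := by
  have hL : L ∉ d.keys := by
    rw [PySem.Dict.contains_eq_decide_mem_keys] at h
    simpa using h
  conv_rhs => rw [← List.map_id d.items]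
  apply List.map_congr_left
  intro p hp
  have hpk : p.1 ∈ d.keys := by
    simp only [PySem.Dict.keys]
    exact List.mem_map.mpr ⟨p, hp, rfl⟩
  rw [if_neg (by simpa using fun hh : p.1 = L => hL (hh ▸ hpk))]
  rfl

theorem fold_block (L : String) (ts : List (String × Int))
    (d : PySem.Dict String (PySem.Dict String Int))
    (hd : d.contains L = false) (hkeys : d.keys.Nodup)
    (hts : (ts.map Prod.fst).Nodup) (hne : ts ≠ []) :
    (List.foldl (fun d (tc : String × Int) =>
        d.insert L ((d.getD L PySem.Dict.empty).insert tc.1 tc.2)) d ts).items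
      = d.items ++ [(L, PySem.Dict.mk ts)] := by
  induction ts using List.reverseRecOn with
  | nil => exact absurd rfl hne
  | append_singleton ts tc ih =>
    rw [List.foldl_append, List.foldl_cons, List.foldl_nil]
    by_cases h0 : ts = []
    · subst h0
      simp only [List.foldl_nil]
      rw [PySem.Dict.getD_of_not_contains d _ hd,
        PySem.Dict.items_insert_of_not_contains d _ hd]
      rfl
    · rw [List.map_append] at hts
      rcases List.nodup_append.mp hts with ⟨hnd_ts, _, hdisj⟩
      have htcts : tc.1 ∉ ts.map Prod.fst := fun hmem => hdisj _ hmem tc.1 (by simp) rfl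
      have hitems := ih hnd_ts h0
      have hLd : L ∉ d.keys := by
        rw [PySem.Dict.contains_eq_decide_mem_keys] at hd
        simpa using hd
      set dp := List.foldl (fun d (tc : String × Int) =>
        d.insert L ((d.getD L PySem.Dict.empty).insert tc.1 tc.2)) d ts with hdp
      have hkdp : dp.keys = d.keys ++ [L] := by
        simp only [PySem.Dict.keys]
        rw [hitems, List.map_append]
        rfl
      have hnddp : dp.keys.Nodup := by
        rw [hkdp, List.nodup_append]
        refine ⟨hkeys, List.nodup_singleton _, ?_⟩
        intro a ha b hb
        rcases List.mem_singleton.mp hb with rfl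
        exact fun h => hLd (h ▸ ha)
      have hcont : dp.contains L = true := by
        rw [PySem.Dict.contains_eq_decide_mem_keys, hkdp]
        simp
      have hgetD : dp.getD L PySem.Dict.empty = PySem.Dict.mk ts :=
        PySem.Dict.getD_of_mem_items dp
          (by rw [hitems]; exact List.mem_append_right _ (by simp)) hnddp _
      have hcontmk : (PySem.Dict.mk ts).contains tc.1 = false := by
        rw [PySem.Dict.contains_mk]
        simp only [List.any_eq_false]
        intro p hp
        simpa using fun h : p.1 = tc.1 => htcts (h ▸ List.mem_map.mpr ⟨p, hp, rfl⟩)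
      have hmkins : (PySem.Dict.mk ts).insert tc.1 tc.2 = PySem.Dict.mk (ts ++ [tc]) := by
        apply PySem.Dict.ext
        rw [PySem.Dict.items_insert_of_not_contains _ _ hcontmk]
      rw [hgetD, hmkins, PySem.Dict.items_insert_of_contains dp _ hcont, hitems,
        List.map_append, items_map_keep_of_not_contains d L _ hd]
      simp

theorem fold_levels (Ls : List String) (tsOf : String → List (String × Int))
    (d : PySem.Dict String (PySem.Dict String Int))
    (hnd : Ls.Nodup) (hfresh : ∀ L ∈ Ls, d.contains L = false) (hkeys : d.keys.Nodup)
    (hblocks : ∀ L ∈ Ls, ((tsOf L).map Prod.fst).Nodup ∧ tsOf L ≠ []) :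
    (List.foldl dstep d
        (Ls.flatMap (fun L => (tsOf L).map (fun tc => ((L, tc.1), tc.2))))).items
      = d.items ++ Ls.map (fun L => (L, PySem.Dict.mk (tsOf L))) := by
  induction Ls generalizing d with
  | nil => simp
  | cons L Ls ih =>
    rw [List.flatMap_cons, List.foldl_append]
    have hfold : List.foldl dstep d ((tsOf L).map (fun tc => ((L, tc.1), tc.2)))
        = List.foldl (fun d (tc : String × Int) =>
            d.insert L ((d.getD L PySem.Dict.empty).insert tc.1 tc.2)) d (tsOf L) := by
      rw [List.foldl_map]
      rfl
    rw [hfold]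
    set d1 := List.foldl (fun d (tc : String × Int) =>
        d.insert L ((d.getD L PySem.Dict.empty).insert tc.1 tc.2)) d (tsOf L) with hd1
    have hitems1 : d1.items = d.items ++ [(L, PySem.Dict.mk (tsOf L))] :=
      fold_block L (tsOf L) d (hfresh L List.mem_cons_self) hkeys
        (hblocks L List.mem_cons_self).1 (hblocks L List.mem_cons_self).2
    have hk1 : d1.keys = d.keys ++ [L] := by
      simp only [PySem.Dict.keys]
      rw [hitems1, List.map_append]
      rfl
    have hLd : L ∉ d.keys := by
      have := hfresh L List.mem_cons_self
      rw [PySem.Dict.contains_eq_decide_mem_keys] at this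
      simpa using this
    have hkeys1 : d1.keys.Nodup := by
      rw [hk1, List.nodup_append]
      refine ⟨hkeys, List.nodup_singleton _, ?_⟩
      intro a ha b hb
      rcases List.mem_singleton.mp hb with rfl
      exact fun h => hLd (h ▸ ha)
    have hfresh1 : ∀ L' ∈ Ls, d1.contains L' = false := by
      intro L' hL'
      rw [PySem.Dict.contains_eq_decide_mem_keys, hk1]
      have h1 : L' ∉ d.keys := by
        have := hfresh L' (List.mem_cons_of_mem _ hL')
        rw [PySem.Dict.contains_eq_decide_mem_keys] at this
        simpa using this
      have h2 : L' ≠ L := fun h => (List.nodup_cons.mp hnd).1 (h ▸ hL')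
      simp [h1, h2]
    rw [ih d1 (List.nodup_cons.mp hnd).2 hfresh1 hkeys1
      (fun L' hL' => hblocks L' (List.mem_cons_of_mem _ hL')), hitems1]
    simp

theorem segs_map_flat (ps : List (String × String)) :
    (segs ps).map (fun s => (s.1, (s.2 : Int)))
      = (sKeys (ps.map Prod.fst)).flatMap
          (fun L => (((sKeys (tams L ps)).map (fun t => (t, (ps.count (L, t) : Int)))).map
            (fun tc => ((L, tc.1), tc.2)))) := by
  simp [segs, List.map_flatMap, List.map_map, Function.comp_def]

theorem B_eq_C (rows : List (List (String × String))) :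
    count_level_tam_py_alt rows = C (rows.map (fun r => (rowGet r "level" "Unknown", rowGet r "tam_bucket" "none"))) := by
  set ps := rows.map (fun r => (rowGet r "level" "Unknown", rowGet r "tam_bucket" "none")) with hps
  have halt : count_level_tam_py_alt rows
      = ((List.foldl runStep [] (PySem.List.sorted2 ps Prod.fst Prod.snd)).foldl dstep
          PySem.Dict.empty).items.map (fun q => (q.1, q.2.items)) := rfl
  rw [halt, sorted2_eq_canon,
    show canonList ps = (segs ps).flatMap (fun s => List.replicate s.2 s.1) from rfl,
    runs_segs (segs ps) [] (segs_pos ps)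
      ((segs_keys_pairwise ps).imp (fun h => lexlt_ne _ _ h))
      (by intro qc h; simp at h),
    List.nil_append, segs_map_flat ps,
    fold_levels (sKeys (ps.map Prod.fst))
      (fun L => (sKeys (tams L ps)).map (fun t => (t, (ps.count (L, t) : Int))))
      PySem.Dict.empty (nodup_sKeys _)
      (fun L _ => PySem.Dict.contains_empty _)
      (by simp [PySem.Dict.keys, PySem.Dict.empty])
      ?_]
  · simp [C, PySem.Dict.empty, List.map_map, Function.comp_def]
  · intro L hL
    constructor
    · simp only [List.map_map]
      have : ((fun p : String × Int => p.1) ∘ (fun t => (t, (ps.count (L, t) : Int))))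
          = fun t => t := rfl
      rw [this]
      simpa using nodup_sKeys (tams L ps)
    · have hLmem : L ∈ ps.map Prod.fst := (mem_sKeys _ _).mp hL
      rcases List.mem_map.mp hLmem with ⟨p, hp, rfl⟩
      have : p.2 ∈ tams p.1 ps := (mem_tams _ _ _).mpr (by simpa using hp)
      have hne : sKeys (tams p.1 ps) ≠ [] :=
        List.ne_nil_of_mem ((mem_sKeys _ _).mpr this)
      simp [hne]

-- ===== VERDICT (by name: the statement is the Claim_ definition above) =====
theorem count_level_tam_py_spec : Claim_equal_count_level_tam_py := by
  intro rows _
  unfold Spec_count_level_tam_py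
  rw [A_eq_C, B_eq_C]
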